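-- pv_equiv track=rewrite | github.com/Paladnix/NLP_Aelbert | utils/ABCNNDataSet.py | get_seg_ids
-- ===== SOURCE A (Python) =====
-- SEP_ID = 102
--
-- def get_seg_ids(ids):
--     seg_ids = []
--     tag = 0
--     for x in ids:
--         seg_ids += [tag]
--         if x == SEP_ID:
--             tag += 1
--     return seg_ids
-- ===== SOURCE B (Python) =====
-- from itertools import accumulate
--
-- SEP_ID = 102
--
-- def get_seg_ids(ids):
--     flags = [1 if x == SEP_ID else 0 for x in ids]
--     return list(accumulate(flags, initial=0))[:-1]
-- ===== Notes on version B (the rewrite author's own statement) =====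
-- stated objective: idiomatic
-- what changed: Replaced the running-counter loop with an indicator table followed by an exclusive prefix sum via itertools.accumulate.
import Mathlib
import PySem

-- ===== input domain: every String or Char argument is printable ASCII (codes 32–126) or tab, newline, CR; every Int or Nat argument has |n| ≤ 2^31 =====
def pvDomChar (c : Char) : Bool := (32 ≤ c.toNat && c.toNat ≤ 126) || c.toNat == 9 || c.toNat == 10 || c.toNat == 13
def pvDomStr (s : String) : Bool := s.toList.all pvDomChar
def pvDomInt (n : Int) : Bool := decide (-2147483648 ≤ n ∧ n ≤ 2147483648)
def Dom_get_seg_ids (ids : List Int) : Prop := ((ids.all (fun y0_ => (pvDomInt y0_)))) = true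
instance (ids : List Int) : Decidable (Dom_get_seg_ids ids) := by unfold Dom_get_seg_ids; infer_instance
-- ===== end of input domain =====

-- B replaces A's running-counter loop by an indicator table plus an exclusive
-- prefix sum (idiomatic two-phase decomposition); same O(n) cost.

-- ===== PORT A =====
-- A: append tag for each x, bump tag after each SEP (102).
def get_seg_ids (ids : List Int) : List Int :=
  (ids.foldl (fun (s : List Int × Int) x =>
      (s.1 ++ [s.2], if x = 102 then s.2 + 1 else s.2)) ([], 0)).1

-- ===== PORT B =====
-- B: flags table, then exclusive prefix sum (accumulate with initial 0, drop last).
def get_seg_ids_alt (ids : List Int) : List Int :=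
  ((ids.map (fun x => if x = 102 then (1 : Int) else 0)).scanl (· + ·) 0).dropLast

-- ===== PRECONDITION & SPEC =====
def Spec_get_seg_ids (ids : List Int) (out : List Int) : Prop := out = get_seg_ids_alt ids
instance (ids : List Int) (out : List Int) : Decidable (Spec_get_seg_ids ids out) := by unfold Spec_get_seg_ids; infer_instance

-- ===== CLAIM (what is proved, stated in full; the proofs are below) =====
def Claim_equal_get_seg_ids : Prop := ∀ (ids : List Int), Dom_get_seg_ids ids → Spec_get_seg_ids ids (get_seg_ids ids)

-- ===== LEMMAS AND PROOFS =====
theorem scanl_ne_nil' {α β : Type} (f : β → α → β) (b : β) (l : List α) :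
    l.scanl f b ≠ [] := by cases l <;> simp [List.scanl]

theorem seg_loop_eq (ids : List Int) (acc : List Int) (tag : Int) :
    (ids.foldl (fun (s : List Int × Int) x =>
        (s.1 ++ [s.2], if x = 102 then s.2 + 1 else s.2)) (acc, tag)).1
      = acc ++ ((ids.map (fun x => if x = 102 then (1 : Int) else 0)).scanl (· + ·) tag).dropLast := by
  induction ids generalizing acc tag with
  | nil => simp [List.scanl]
  | cons x xs ih =>
      simp only [List.foldl_cons, List.map_cons, List.scanl_cons]
      rw [ih, List.dropLast_cons_of_ne_nil (scanl_ne_nil' _ _ _)]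
      by_cases h : x = 102 <;> simp [h]

-- ===== VERDICT (by name: the statement is the Claim_ definition above) =====
theorem get_seg_ids_spec : Claim_equal_get_seg_ids := by
  intro ids _
  unfold Spec_get_seg_ids get_seg_ids get_seg_ids_alt
  simpa using seg_loop_eq ids [] 0
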